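-- pv_equiv track=rewrite | github.com/Aaron-Roar/Decision-Tree-Visualizer | information_gain.py | make_att_spec_targ_list
-- ===== SOURCE A (Python) =====
-- def make_att_spec_targ_list(attribute_couple,target_couple):
--     #The for and while loop directly below create a 2D list of index locations, each sub-list contains the index locations of that attribute quality (ie. sunny)
--     index_loc_list = []
--     for quality in attribute_couple[1]:
--         sub_index_loc_list = []
--         i = 0
--         while(i < len(attribute_couple[0])):
--             if(quality == attribute_couple[0][i]):
--                 sub_index_loc_list.append(i)
--             i += 1
--         index_loc_list.append(sub_index_loc_list)
--
--     #The loops below use the attribute specific index locations from above to make a 2D list of target classifications specific to each attribute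
--     targets_wrt_spec_att = []
--     i = 0
--     while(i < len(index_loc_list)):
--         sub_target_spc_att = []
--         for item in index_loc_list[i]:
--             sub_target_spc_att.append(target_couple[0][item])
--
--         targets_wrt_spec_att.append(sub_target_spc_att)
--         i += 1
--
--     return targets_wrt_spec_att
-- ===== SOURCE B (Python) =====
-- def make_att_spec_targ_list(attribute_couple, target_couple):
--     qualities = attribute_couple[1]
--     targets = target_couple[0] if target_couple else []
--     groups = {}
--     for value, target in zip(attribute_couple[0], targets):
--         groups.setdefault(value, []).append(target)
--     return [groups.get(q, []) for q in qualities]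
-- ===== Notes on version B (the rewrite author's own statement) =====
-- stated objective: faster
-- what changed: Instead of rescanning the whole attribute column once per quality (and then a second index-to-target pass), B makes a single zip pass building a dict quality -> list of targets and then emits the group for each quality by one dict lookup.
import Mathlib
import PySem

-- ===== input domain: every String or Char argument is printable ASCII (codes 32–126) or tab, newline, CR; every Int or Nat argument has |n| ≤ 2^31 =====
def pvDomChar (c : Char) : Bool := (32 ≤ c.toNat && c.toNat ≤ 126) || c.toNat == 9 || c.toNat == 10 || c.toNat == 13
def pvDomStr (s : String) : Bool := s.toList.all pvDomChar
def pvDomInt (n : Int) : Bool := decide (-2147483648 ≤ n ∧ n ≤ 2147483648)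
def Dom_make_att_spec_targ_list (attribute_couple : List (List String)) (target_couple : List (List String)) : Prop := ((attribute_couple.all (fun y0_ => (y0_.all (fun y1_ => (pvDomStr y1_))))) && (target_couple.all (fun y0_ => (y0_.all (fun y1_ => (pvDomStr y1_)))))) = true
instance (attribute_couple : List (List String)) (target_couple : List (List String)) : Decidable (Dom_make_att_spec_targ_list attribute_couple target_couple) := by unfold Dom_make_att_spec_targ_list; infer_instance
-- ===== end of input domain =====

-- B replaces A's per-quality rescans of the attribute column by one grouping pass
-- (dict quality → target list) and then emits the groups in quality order (objective: faster).

-- ===== PORT A =====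
-- literal port: for each quality, a while-loop over the indices of attribute_couple[0]
-- collecting matches, then a second pass mapping each index to target_couple[0][item]
def make_att_spec_targ_list (attribute_couple : List (List String)) (target_couple : List (List String)) : List (List String) :=
  let a0 := (PySem.List.pyGet? attribute_couple 0).getD []
  let a1 := (PySem.List.pyGet? attribute_couple 1).getD []
  let index_loc_list : List (List Int) := a1.foldl (fun acc quality =>
    acc ++ [(PySem.List.pyRange 0 (PySem.List.len a0) 1).foldl (fun sub i =>
      if quality = PySem.List.pyGetD a0 i "" then sub ++ [i] else sub) []]) []
  let t0 := (PySem.List.pyGet? target_couple 0).getD []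
  index_loc_list.foldl (fun acc sub =>
    acc ++ [sub.foldl (fun st item => st ++ [PySem.List.pyGetD t0 item ""]) []]) []

-- ===== PORT B =====
-- literal port of Source B: one zip pass building the groups dict, then one lookup per quality
def make_att_spec_targ_list_alt (attribute_couple : List (List String)) (target_couple : List (List String)) : List (List String) :=
  let qualities := (PySem.List.pyGet? attribute_couple 1).getD []
  let targets := if target_couple ≠ [] then (PySem.List.pyGet? target_couple 0).getD [] else []
  let groups : PySem.Dict String (List String) :=
    (((PySem.List.pyGet? attribute_couple 0).getD []).zip targets).foldl
      (fun d p => d.modify p.1 [] (· ++ [p.2])) PySem.Dict.empty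
  qualities.map (fun q => groups.getD q [])

-- ===== PRECONDITION & SPEC =====
-- Pre_ excludes exactly the inputs where A raises: attribute_couple shorter than 2
-- (IndexError on attribute_couple[1]), or some attribute value that occurs among the
-- qualities sits at an index with no corresponding entry in target_couple[0]
-- (IndexError on target_couple[0][item]).
def Pre_make_att_spec_targ_list (attribute_couple : List (List String)) (target_couple : List (List String)) : Prop :=
  2 ≤ attribute_couple.length ∧
  ∀ i ∈ List.range (attribute_couple.getD 0 []).length,
    (attribute_couple.getD 0 []).getD i "" ∈ attribute_couple.getD 1 [] →
      target_couple ≠ [] ∧ i < (target_couple.getD 0 []).length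
instance (attribute_couple : List (List String)) (target_couple : List (List String)) : Decidable (Pre_make_att_spec_targ_list attribute_couple target_couple) := by unfold Pre_make_att_spec_targ_list; infer_instance

def pvWitness_make_att_spec_targ_list : List (List String) × List (List String) :=
  ([["sunny", "rain", "sunny"], ["sunny", "rain"]], [["yes", "no", "yes"]])

def Spec_make_att_spec_targ_list (attribute_couple : List (List String)) (target_couple : List (List String)) (out : List (List String)) : Prop := out = make_att_spec_targ_list_alt attribute_couple target_couple
instance (attribute_couple : List (List String)) (target_couple : List (List String)) (out : List (List String)) : Decidable (Spec_make_att_spec_targ_list attribute_couple target_couple out) := by unfold Spec_make_att_spec_targ_list; infer_instance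

-- ===== CLAIM (what is proved, stated in full; the proofs are below) =====
def Claim_equal_make_att_spec_targ_list : Prop := ∀ (attribute_couple : List (List String)) (target_couple : List (List String)), Dom_make_att_spec_targ_list attribute_couple target_couple → Pre_make_att_spec_targ_list attribute_couple target_couple → Spec_make_att_spec_targ_list attribute_couple target_couple (make_att_spec_targ_list attribute_couple target_couple)

-- ===== LEMMAS AND PROOFS =====

-- A's two passes for one quality q (collect matching indices, then read the targets at
-- those indices) produce exactly the targets zipped with the matching attribute values.
lemma core_lemma (a0 t0 : List String) (q : String)
    (H : ∀ i, i < a0.length → a0.getD i "" = q → i < t0.length) :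
    ((List.range a0.length).filter (fun i => decide (q = a0.getD i ""))).map
        (fun i => t0.getD i "")
      = ((a0.zip t0).filter (fun p => p.1 == q)).map (·.2) := by
  induction a0 generalizing t0 with
  | nil => simp
  | cons x a0' ih =>
    rw [show (x :: a0').length = a0'.length + 1 from rfl, List.range_succ_eq_map]
    cases t0 with
    | nil =>
      have hx : ¬ (q = x) := fun h => by
        have := H 0 (by simp) (by simpa using h.symm); simp at this
      simp only [List.filter_cons, List.filter_map]
      simp [hx]
      intro i hi hqi
      have := H (i + 1) (by simpa using Nat.succ_lt_succ hi) (by simpa using hqi.symm)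
      simp at this
    | cons y t0' =>
      have htail := ih t0' (fun i hi hq => by
        have := H (i + 1) (by simpa using Nat.succ_lt_succ hi) (by simpa using hq)
        simp at this; omega)
      by_cases hx : q = x
      · subst hx
        simp only [List.zip_cons_cons, List.filter_cons, List.filter_map]
        simp [Function.comp_def]
        simpa using htail
      · simp only [List.zip_cons_cons, List.filter_cons, List.filter_map]
        simp [hx, Ne.symm hx, Function.comp_def]
        simpa using htail

-- ===== VERDICT (by name: the statement is the Claim_ definition above) =====
theorem make_att_spec_targ_list_spec : Claim_equal_make_att_spec_targ_list := by
  intro ac tc _hdom hpre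
  obtain ⟨hlen, hidx⟩ := hpre
  have h0 : (PySem.List.pyGet? ac 0).getD [] = ac.getD 0 [] := by
    rw [PySem.List.pyGet?_zero]; rfl
  have h1 : (PySem.List.pyGet? ac 1).getD [] = ac.getD 1 [] := by
    rw [show (1 : Int) = ((1 : Nat) : Int) from rfl, PySem.List.pyGet?_natCast]; rfl
  have ht : (PySem.List.pyGet? tc 0).getD [] = tc.getD 0 [] := by
    rw [PySem.List.pyGet?_zero]; rfl
  unfold Spec_make_att_spec_targ_list make_att_spec_targ_list make_att_spec_targ_list_alt
  simp only [PySem.List.foldl_append_singleton_eq_map, List.nil_append, List.map_map,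
    PySem.Dict.getD_foldl_modify_append, PySem.Dict.getD_empty,
    PySem.List.len_eq, PySem.List.pyRange_zero_natCast, h0, h1, ht]
  apply List.map_congr_left
  intro q hq
  simp only [Function.comp_def]
  rw [show (fun (sub : List Int) (i : Int) =>
        if q = PySem.List.pyGetD (ac.getD 0 []) i "" then sub ++ [i] else sub)
      = (fun (sub : List Int) (i : Int) =>
        if (decide (q = PySem.List.pyGetD (ac.getD 0 []) i "")) = true
        then sub ++ [(fun (j : Int) => j) i] else sub) from by
      funext sub i; simp,
    PySem.List.foldl_append_if]
  simp only [List.nil_append, List.filter_map, List.map_map, Function.comp_def,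
    PySem.List.pyGetD_natCast]
  have hT : (if tc ≠ [] then tc.getD 0 [] else []) = tc.getD 0 [] := by
    split
    · rfl
    · next h => simp only [ne_eq, not_not] at h; subst h; rfl
  rw [hT]
  apply core_lemma
  intro i hi heq
  have hmem : (ac.getD 0 []).getD i "" ∈ ac.getD 1 [] := by rw [heq]; exact hq
  exact (hidx i (List.mem_range.mpr hi) hmem).2
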